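-- pv_equiv track=rewrite | github.com/Jorisvansteenbrugge/algorithms | assignment4_joris.py | get_node_balances
-- ===== SOURCE A (Python) =====
-- def get_node_balances(graph):
--     """Returns the balances for each node in a graph.
--
--         Keyword Arguments:
--             graph -- dictionary, {node_label: [connectionA, connectionB]}.
--     """
--     from_nodes = graph.keys()
--     to_nodes   = graph.values()
--
--     balances = {}
--
--     for key in from_nodes:
--         from_count = len(graph[key])
--
--         to_count   = sum([1 for x in to_nodes if key in x])
--
--         balances[key] = to_count - from_count
--
--     return balances
-- ===== SOURCE B (Python) =====
-- def get_node_balances(graph):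
--     """Returns the balances for each node in a graph.
--
--         Keyword Arguments:
--             graph -- dictionary, {node_label: [connectionA, connectionB]}.
--     """
--     indeg = {}
--     for lst in graph.values():
--         for v in set(lst):
--             indeg[v] = indeg.get(v, 0) + 1
--     return {key: indeg.get(key, 0) - len(lst) for key, lst in graph.items()}
-- ===== Notes on version B (the rewrite author's own statement) =====
-- stated objective: faster
-- what changed: Instead of scanning every adjacency list again for each node, B makes one pass over all adjacency lists accumulating an in-degree counter dict (one count per list that contains the node, matching A's 'key in x' test), then emits key -> indeg - out-degree in a single comprehension.
import Mathlib
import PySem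

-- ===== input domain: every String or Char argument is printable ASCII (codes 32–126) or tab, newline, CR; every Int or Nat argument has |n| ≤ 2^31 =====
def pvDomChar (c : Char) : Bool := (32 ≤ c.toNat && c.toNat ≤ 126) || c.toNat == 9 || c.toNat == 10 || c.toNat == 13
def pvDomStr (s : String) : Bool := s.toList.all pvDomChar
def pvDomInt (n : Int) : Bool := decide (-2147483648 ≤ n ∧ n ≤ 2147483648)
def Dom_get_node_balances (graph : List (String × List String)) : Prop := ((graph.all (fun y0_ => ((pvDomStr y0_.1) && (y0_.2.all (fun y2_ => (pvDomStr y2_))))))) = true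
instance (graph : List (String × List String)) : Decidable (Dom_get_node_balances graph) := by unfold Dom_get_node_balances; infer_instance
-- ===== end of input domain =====

-- B replaces A's per-node rescan of all adjacency lists by a single counting pass (faster); return-value equivalence on dict-representable inputs.


-- ===== PORT A =====
def get_node_balances (graph : List (String × List String)) : List (String × Int) :=
  let from_nodes := graph.map Prod.fst
  let to_nodes := graph.map Prod.snd
  let balances : PySem.Dict String Int :=
    from_nodes.foldl (fun balances key =>
      let from_count : Int := (((PySem.Dict.mk graph).get? key).getD []).length
      let to_count : Int := ((to_nodes.filter (fun x => decide (key ∈ x))).map (fun _ => (1 : Int))).sum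
      balances.insert key (to_count - from_count)) PySem.Dict.empty
  balances.items

-- ===== PORT B =====
def get_node_balances_alt (graph : List (String × List String)) : List (String × Int) :=
  let indeg : PySem.Dict String Int :=
    graph.foldl (fun d p =>
      (PySem.Set.ofList p.2).foldl (fun d v => d.insert v (d.getD v 0 + 1)) d) PySem.Dict.empty
  graph.map (fun p => (p.1, indeg.getD p.1 0 - (p.2.length : Int)))

-- ===== PRECONDITION & SPEC =====
-- Pre_ excludes association lists with duplicate keys: a Python dict cannot contain them, so A's
-- behaviour there is not defined by the source; it does not exclude any dict-representable input.
def Pre_get_node_balances (graph : List (String × List String)) : Prop :=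
  (graph.map Prod.fst).Nodup
instance (graph : List (String × List String)) : Decidable (Pre_get_node_balances graph) := by unfold Pre_get_node_balances; infer_instance

def pvWitness_get_node_balances : (List (String × List String)) :=
  [("a", ["b", "b"]), ("b", ["a"]), ("c", [])]

def Spec_get_node_balances (graph : List (String × List String)) (out : List (String × Int)) : Prop := out = get_node_balances_alt graph
instance (graph : List (String × List String)) (out : List (String × Int)) : Decidable (Spec_get_node_balances graph out) := by unfold Spec_get_node_balances; infer_instance

-- ===== CLAIM (what is proved, stated in full; the proofs are below) =====
def Claim_equal_get_node_balances : Prop := ∀ (graph : List (String × List String)), Dom_get_node_balances graph → Pre_get_node_balances graph → Spec_get_node_balances graph (get_node_balances graph)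

-- ===== LEMMAS AND PROOFS =====

-- sum of the constant-1 list A builds = length
theorem pv_sum_ones (l : List (List String)) :
    (l.map (fun _ => (1 : Int))).sum = (l.length : Int) := by
  induction l with
  | nil => simp
  | cons x xs ih =>
    simp
    ring

-- B's counter: in-degree of k = number of adjacency lists containing k
theorem pv_indeg (graph : List (String × List String)) (d : PySem.Dict String Int) (k : String) :
    (graph.foldl (fun d p =>
        (PySem.Set.ofList p.2).foldl (fun d v => d.insert v (d.getD v 0 + 1)) d) d).getD k 0
      = d.getD k 0 + ((graph.filter (fun p => decide (k ∈ p.2))).length : Int) := by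
  induction graph generalizing d with
  | nil => simp
  | cons p rest ih =>
    simp only [List.foldl_cons, ih, PySem.Dict.getD_foldl_insert_add_one]
    have hcount : ((PySem.Set.ofList p.2).count k : Int) = if k ∈ p.2 then 1 else 0 := by
      by_cases h : k ∈ p.2
      · have hm : k ∈ PySem.Set.ofList p.2 := (PySem.Set.mem_ofList _ _).2 h
        rw [List.count_eq_one_of_mem (PySem.Set.nodup_ofList p.2) hm]
        simp [h]
      · have hm : k ∉ PySem.Set.ofList p.2 := fun hc => h ((PySem.Set.mem_ofList _ _).1 hc)
        rw [List.count_eq_zero_of_not_mem hm]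
        simp [h]
    rw [hcount]
    by_cases h : k ∈ p.2 <;> simp [h] <;> ring

-- lookup in the original dict under Nodup keys
theorem pv_lookup (graph : List (String × List String)) (p : String × List String)
    (hnd : (graph.map Prod.fst).Nodup) (hp : p ∈ graph) :
    ((PySem.Dict.mk graph).get? p.1).getD [] = p.2 := by
  have : (PySem.Dict.mk graph).get? p.1 = some p.2 := by
    apply PySem.Dict.get?_of_mem_items (d := PySem.Dict.mk graph) (k := p.1) (v := p.2)
    · simpa [PySem.Dict.items] using hp
    · simpa [PySem.Dict.keys] using hnd
  simp [this]

-- ===== VERDICT (by name: the statement is the Claim_ definition above) =====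
theorem get_node_balances_spec : Claim_equal_get_node_balances := by
  intro graph hdom hpre
  unfold Spec_get_node_balances get_node_balances get_node_balances_alt
  simp only []
  -- A's loop inserts each key of graph exactly once, keys are fresh and distinct
  rw [PySem.Dict.items_foldl_insert_fresh
        (l := graph.map Prod.fst)
        (k := fun key => key)
        (v := fun key =>
          (((graph.map Prod.snd).filter (fun x => decide (key ∈ x))).map (fun _ => (1 : Int))).sum
            - (((PySem.Dict.mk graph).get? key).getD []).length)
        (d := PySem.Dict.empty)
        (by intro a _; simp)
        (by simpa using hpre)]
  simp only [PySem.Dict.empty, List.nil_append, List.map_map]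
  apply List.map_congr_left
  intro p hp
  simp only [Function.comp]
  congr 1
  have hfil : (graph.map Prod.snd).filter (fun x => decide (p.1 ∈ x))
      = (graph.filter (fun q => decide (p.1 ∈ q.2))).map Prod.snd := by
    clear hp hpre hdom
    induction graph with
    | nil => rfl
    | cons q r ih => by_cases h : p.1 ∈ q.2 <;> simp [h, ih]
  rw [pv_sum_ones, hfil, pv_indeg, pv_lookup graph p hpre hp]
  simp [PySem.Dict.getD, PySem.Dict.get?]
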